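-- pv_equiv track=rewrite | github.com/fang19911030/pythonForAlgorithms | string_composition.py | get_overlap_graph
-- ===== SOURCE A (Python) =====
-- def get_prefix(string):
--     length=len(string)
--     prefix=string[0:length-1]
--     return prefix
--
-- def get_suffix(string):
--     suffix=string[1:len(string)]
--     return suffix
--
-- def get_overlap_graph(Input):
--     temp=Input
--     graph=[[] for _ in range(len(Input))]
--     for i in range(len(Input)):
--         for j in range(len(temp)):
--             if get_suffix(Input[i])==get_prefix(temp[j]):
--                 graph[i].append(1)
--             else:
--                 graph[i].append(0)
--
--     return graph
-- ===== SOURCE B (Python) =====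
-- def get_prefix(string):
--     length=len(string)
--     prefix=string[0:length-1]
--     return prefix
--
-- def get_suffix(string):
--     suffix=string[1:len(string)]
--     return suffix
--
-- def get_overlap_graph(Input):
--     n = len(Input)
--     cols = {}
--     for j, s in enumerate(Input):
--         cols.setdefault(get_prefix(s), []).append(j)
--     graph = []
--     for s in Input:
--         row = [0] * n
--         for j in cols.get(get_suffix(s), []):
--             row[j] = 1
--         graph.append(row)
--     return graph
-- ===== Notes on version B (the rewrite author's own statement) =====
-- stated objective: faster
-- what changed: B builds a dict grouping each prefix to its column indices once, then fills each row of zeros by a single lookup of the row's suffix, replacing A's inner comparison scan over all columns for every row.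
import Mathlib
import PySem

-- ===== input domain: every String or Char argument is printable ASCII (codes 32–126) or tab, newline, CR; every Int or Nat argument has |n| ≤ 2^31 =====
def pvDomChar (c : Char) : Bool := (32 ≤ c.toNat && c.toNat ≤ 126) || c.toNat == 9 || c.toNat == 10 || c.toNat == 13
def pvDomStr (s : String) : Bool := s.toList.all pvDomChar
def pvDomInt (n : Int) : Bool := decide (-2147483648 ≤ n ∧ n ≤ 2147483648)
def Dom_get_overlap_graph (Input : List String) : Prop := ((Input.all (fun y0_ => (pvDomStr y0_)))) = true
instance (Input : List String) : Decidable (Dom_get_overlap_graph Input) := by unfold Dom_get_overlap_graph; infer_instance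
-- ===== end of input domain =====

-- B builds a prefix→column-indices dict once and fills each zero row by one suffix lookup,
-- instead of A's inner scan comparing every (row, column) pair of strings.

-- ===== PORT A =====
-- shared module helpers (used verbatim by both Pythons)
def get_prefix (string : String) : String :=
  let length := PySem.Str.len string
  let pref := PySem.Str.slice string (some 0) (some (length - 1))
  pref

def get_suffix (string : String) : String :=
  let suffix := PySem.Str.slice string (some 1) (some (PySem.Str.len string))
  suffix

def get_overlap_graph (Input : List String) : List (List Int) :=
  let temp := Input
  let graph : List (List Int) :=
    (List.range Input.length).map (fun _ => ([] : List Int))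
  let graph :=
    (PySem.List.pyRange 0 (PySem.List.len Input) 1).foldl (fun graph i =>
      (PySem.List.pyRange 0 (PySem.List.len temp) 1).foldl (fun graph j =>
        if get_suffix (PySem.List.pyGetD Input i "") = get_prefix (PySem.List.pyGetD temp j "") then
          PySem.List.pySetD graph i (PySem.List.pyGetD graph i [] ++ [(1 : Int)])
        else
          PySem.List.pySetD graph i (PySem.List.pyGetD graph i [] ++ [(0 : Int)])) graph) graph
  graph

-- ===== PORT B =====
def get_overlap_graph_alt (Input : List String) : List (List Int) :=
  let n := Input.length
  let cols : PySem.Dict String (List Int) :=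
    (PySem.List.enumerate Input).foldl
      (fun d p => d.modify (get_prefix p.2) [] (· ++ [p.1])) PySem.Dict.empty
  Input.foldl (fun graph s =>
    let row := List.replicate n (0 : Int)
    let row := (cols.getD (get_suffix s) []).foldl
      (fun row j => PySem.List.pySetD row j 1) row
    graph ++ [row]) []

-- ===== PRECONDITION & SPEC =====
def Spec_get_overlap_graph (Input : List String) (out : List (List Int)) : Prop := out = get_overlap_graph_alt Input
instance (Input : List String) (out : List (List Int)) : Decidable (Spec_get_overlap_graph Input out) := by unfold Spec_get_overlap_graph; infer_instance

-- ===== CLAIM (what is proved, stated in full; the proofs are below) =====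
def Claim_equal_get_overlap_graph : Prop := ∀ (Input : List String), Dom_get_overlap_graph Input → Spec_get_overlap_graph Input (get_overlap_graph Input)

-- ===== LEMMAS AND PROOFS =====

-- the common mathematical value both ports compute, row by row
def pvRow (Input : List String) (s : String) : List Int :=
  Input.map (fun t => if get_suffix s = get_prefix t then 1 else 0)

theorem map_range_eq_pvRow (Input : List String) (i : Nat) (hi : i < Input.length) :
    (List.range Input.length).map (fun j =>
        if get_suffix (Input.getD i "") = get_prefix (Input.getD j "") then (1:Int) else 0)
      = pvRow Input Input[i] := by
  rw [List.getD_eq_getElem _ _ hi]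
  apply List.ext_getElem
  · simp [pvRow]
  · intro j h1 h2
    have hj : j < Input.length := by simpa using h1
    simp [pvRow, List.getElem?_eq_getElem hj]

-- A-side: the inner loop appends the j-th entries to row i
theorem A_inner (i : Nat) (f : Nat → Int) (m : Nat) :
    ∀ (g : List (List Int)),
      (List.range m).foldl (fun g j => g.set i (g.getD i [] ++ [f j])) g
        = g.set i (g.getD i [] ++ (List.range m).map f) := by
  induction m with
  | zero =>
      intro g
      by_cases hi : i < g.length
      · rw [List.range_zero, List.foldl_nil, List.getD_eq_getElem _ _ (by simpa using hi),
          List.map_nil, List.append_nil, List.set_getElem_self]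
      · simp [List.set_eq_of_length_le (Nat.le_of_not_lt hi)]
  | succ m ih =>
      intro g
      rw [List.range_succ, List.foldl_append, ih g]
      simp only [List.foldl_cons, List.foldl_nil, List.set_set, List.map_append, List.map_cons,
        List.map_nil]
      by_cases hi : i < g.length
      · rw [List.getD_eq_getElem _ _ (by simpa using hi)]
        simp [List.getElem_set_self, List.append_assoc]
      · simp [List.set_eq_of_length_le (Nat.le_of_not_lt hi)]

theorem A_outer (Input : List String) :
    ∀ (k : Nat), k ≤ Input.length →
      (List.range k).foldl
          (fun g i => g.set i (g.getD i [] ++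
            (List.range Input.length).map (fun j =>
              if get_suffix (Input.getD i "") = get_prefix (Input.getD j "") then (1:Int) else 0)))
          (List.replicate Input.length ([] : List Int))
        = (Input.take k).map (pvRow Input) ++ List.replicate (Input.length - k) [] := by
  intro k
  induction k with
  | zero => intro _; simp
  | succ k ih =>
      intro hk
      rw [List.range_succ, List.foldl_append, ih (by omega)]
      simp only [List.foldl_cons, List.foldl_nil]
      have hklt : k < Input.length := by omega
      have hlen : ((Input.take k).map (pvRow Input)).length = k := by
        simp [List.length_take, Nat.min_eq_left (le_of_lt hklt)]
      have hd : ((Input.take k).map (pvRow Input) ++ List.replicate (Input.length - k) ([]:List Int)).getD k [] = ([] : List Int) := by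
        rw [List.getD_eq_getElem _ _ (by simp only [List.length_append, List.length_replicate, hlen]; omega)]
        rw [List.getElem_append_right (by omega)]
        simp
      rw [hd]
      have hset : ∀ (pre rest : List (List Int)) (v : List Int), pre.length = k →
          (pre ++ rest).set k v = pre ++ rest.set 0 v := by
        intro pre rest v hp
        rw [List.set_append_right _ _ (by omega), hp, Nat.sub_self]
      have hrep : List.replicate (Input.length - k) ([]:List Int)
          = [] :: List.replicate (Input.length - (k+1)) [] := by
        have : Input.length - k = (Input.length - (k+1)) + 1 := by omega
        rw [this, List.replicate_succ]
      rw [hset _ _ _ hlen, hrep]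
      have htake : Input.take (k+1) = Input.take k ++ [Input[k]] := by
        rw [List.take_add_one]
        simp [List.getElem?_eq_getElem hklt]
      rw [htake, map_range_eq_pvRow Input k hklt]
      have hstep : (Input.map (pvRow Input)).take (k+1)
          = (Input.map (pvRow Input)).take k ++ [pvRow Input Input[k]] := by
        rw [List.take_add_one]
        simp [List.getElem?_map, List.getElem?_eq_getElem hklt]
      simp only [List.map_append, List.map_cons, List.map_nil, List.map_take] at *
      simp

theorem A_eq (Input : List String) :
    get_overlap_graph Input = Input.map (pvRow Input) := by
  unfold get_overlap_graph
  simp only [PySem.List.len_eq, PySem.List.pyRange_zero_nat]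
  rw [List.foldl_map]
  have hbody : ∀ (g : List (List Int)) (i : Nat), i ∈ List.range Input.length →
      ((List.range Input.length).map (fun (k : Nat) => (k : Int))).foldl (fun g j =>
        if get_suffix (PySem.List.pyGetD Input (i:Int) "") = get_prefix (PySem.List.pyGetD Input j "") then
          PySem.List.pySetD g (i:Int) (PySem.List.pyGetD g (i:Int) [] ++ [(1:Int)])
        else
          PySem.List.pySetD g (i:Int) (PySem.List.pyGetD g (i:Int) [] ++ [(0:Int)])) g
      = g.set i (g.getD i [] ++ (List.range Input.length).map (fun j =>
          if get_suffix (Input.getD i "") = get_prefix (Input.getD j "") then (1:Int) else 0)) := by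
    intro g i _
    rw [List.foldl_map]
    rw [← A_inner i (fun j =>
      if get_suffix (Input.getD i "") = get_prefix (Input.getD j "") then (1:Int) else 0)
      Input.length g]
    apply PySem.List.foldl_congr_mem
    intro acc x _
    by_cases h : get_suffix (Input[i]?.getD "") = get_prefix (Input[x]?.getD "")
    · simp [h]
    · simp [h]
  rw [PySem.List.foldl_congr_mem _ _
      (fun g i => g.set i (g.getD i [] ++ (List.range Input.length).map (fun j =>
        if get_suffix (Input.getD i "") = get_prefix (Input.getD j "") then (1:Int) else 0))) _ hbody]
  have h0 : (List.range Input.length).map (fun _ => ([] : List Int))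
      = List.replicate Input.length [] := by
    simp [List.map_const']
  rw [h0]
  have := A_outer Input Input.length le_rfl
  simpa using this

-- B-side: characterise the dict group for a key
theorem B_cols (Input : List String) (k : String) :
    ((PySem.List.enumerate Input).foldl
        (fun d p => d.modify (get_prefix p.2) [] (· ++ [p.1]))
        (PySem.Dict.empty : PySem.Dict String (List Int))).getD k []
      = ((List.range Input.length).filter
            (fun m => get_prefix (Input.getD m "") == k)).map (fun (m : Nat) => (m : Int)) := by
  have h1 : (PySem.List.enumerate Input).foldl
        (fun d p => d.modify (get_prefix p.2) [] (· ++ [p.1]))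
        (PySem.Dict.empty : PySem.Dict String (List Int))
      = ((PySem.List.enumerate Input).map (fun p => (get_prefix p.2, p.1))).foldl
        (fun d p => d.modify p.1 [] (· ++ [p.2])) PySem.Dict.empty := by
    rw [List.foldl_map]
  rw [h1, PySem.Dict.getD_foldl_modify_append]
  rw [PySem.List.enumerate_eq_map_pyRange Input ""]
  simp only [PySem.List.len_eq, PySem.List.pyRange_zero_nat, List.map_map, List.filter_map]
  simp [Function.comp_def]

-- marking a list of (cast) indices keeps the row's length
theorem B_mark_len (L : List Nat) :
    ∀ (r : List Int),
      ((L.map (fun (x : Nat) => (x : Int))).foldl (fun r j => PySem.List.pySetD r j 1) r).length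
        = r.length := by
  induction L with
  | nil => intro r; simp
  | cons a t ih =>
      intro r
      simp only [List.map_cons, List.foldl_cons, PySem.List.pySetD_natCast]
      rw [ih (r.set a 1)]
      simp

-- marking a list of (cast) indices in a row, read pointwise
theorem B_mark_get (L : List Nat) :
    ∀ (r : List Int) (m : Nat) (hm : m < r.length),
      ((L.map (fun (x : Nat) => (x : Int))).foldl (fun r j => PySem.List.pySetD r j 1) r)[m]'(by
        rw [B_mark_len]; exact hm)
        = if m ∈ L then 1 else r[m] := by
  induction L with
  | nil => intro r m hm; simp
  | cons a t ih =>
      intro r m hm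
      simp only [List.map_cons, List.foldl_cons, PySem.List.pySetD_natCast]
      rw [ih (r.set a 1) m (by simpa)]
      by_cases hmem : m ∈ t
      · simp [hmem]
      · rcases eq_or_ne a m with h | h
        · subst h
          simp [hmem, List.getElem_set_self (show a < (r.set a 1).length by simpa using hm)]
        · simp [hmem, Ne.symm h, List.getElem_set_ne h]

theorem B_row (Input : List String) (s : String) :
    (((List.range Input.length).filter
        (fun m => get_prefix (Input.getD m "") == get_suffix s)).map (fun (m : Nat) => (m : Int))).foldl
        (fun row j => PySem.List.pySetD row j 1) (List.replicate Input.length (0:Int))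
      = pvRow Input s := by
  set L := (List.range Input.length).filter
      (fun m => get_prefix (Input.getD m "") == get_suffix s) with hL
  apply List.ext_getElem
  · rw [B_mark_len]; simp [pvRow]
  · intro m h1 h2
    have hm : m < Input.length := by
      have := h1; rwa [B_mark_len, List.length_replicate] at this
    rw [B_mark_get L _ m (by simpa using hm)]
    have hmem : m ∈ L ↔ get_prefix Input[m] = get_suffix s := by
      rw [hL]
      simp [List.mem_filter, List.mem_range, hm]
    simp only [pvRow, List.getElem_map]
    by_cases h : get_suffix s = get_prefix Input[m]
    · simp [hmem.mpr h.symm, h]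
    · have : m ∉ L := fun hc => h (hmem.mp hc).symm
      simp [this, h]

theorem B_eq (Input : List String) :
    get_overlap_graph_alt Input = Input.map (pvRow Input) := by
  unfold get_overlap_graph_alt
  rw [PySem.List.foldl_congr_mem Input _ (fun graph s => graph ++ [pvRow Input s]) []
    (by
      intro acc s _
      dsimp only
      rw [B_cols Input (get_suffix s), B_row Input s])]
  rw [PySem.List.foldl_append_singleton_eq_map]
  simp

-- ===== VERDICT (by name: the statement is the Claim_ definition above) =====
theorem get_overlap_graph_spec : Claim_equal_get_overlap_graph := by
  intro Input _
  unfold Spec_get_overlap_graph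
  rw [A_eq, B_eq]
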